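-- pv_equiv track=rewrite | github.com/ThanhChinhBK/interview-programing-questions | interview/smaxxxxx/JNV34G-VSZ-2.py | solution
-- ===== SOURCE A (Python) =====
-- def solution(A):
--     # write your code in Python 3.6
--     n = len(A)
--     if n <= 2:
--         return n
--     longest = 2
--     tmp_longest = 2
--     for ind in range(2, n):
--         if A[ind-2] == A[ind]:
--             tmp_longest += 1
--         else:
--             tmp_longest = 2
--         longest = max(tmp_longest, longest)
--     return longest
-- ===== SOURCE B (Python) =====
-- from itertools import groupby
--
-- def solution(A):
--     n = len(A)
--     if n <= 2:
--         return n
--     matches = [A[i - 2] == A[i] for i in range(2, n)]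
--     return 2 + max((sum(1 for _ in g) for k, g in groupby(matches) if k), default=0)
-- ===== Notes on version B (the rewrite author's own statement) =====
-- stated objective: idiomatic
-- what changed: Replaces the fused running-counter scan with a two-stage pipeline: first build the boolean table matches[i] = (A[i-2]==A[i]), then take 2 plus the longest run of consecutive True values via itertools.groupby.
import Mathlib
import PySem

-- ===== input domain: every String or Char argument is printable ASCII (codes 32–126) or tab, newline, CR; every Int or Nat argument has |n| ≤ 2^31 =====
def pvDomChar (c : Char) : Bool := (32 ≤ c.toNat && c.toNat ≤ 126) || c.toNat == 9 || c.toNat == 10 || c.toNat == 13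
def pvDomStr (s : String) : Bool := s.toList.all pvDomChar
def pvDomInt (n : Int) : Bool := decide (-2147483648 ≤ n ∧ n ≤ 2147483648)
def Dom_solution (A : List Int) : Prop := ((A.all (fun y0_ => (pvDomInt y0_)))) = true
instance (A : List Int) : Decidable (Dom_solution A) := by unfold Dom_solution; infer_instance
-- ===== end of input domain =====

-- B replaces A's fused running-counter scan with a boolean table build plus a
-- groupby-style longest-run reduction (idiomatic two-stage decomposition; same cost).

-- ===== PORT A =====
-- literal transliteration of A's single fused scan over range(2, n);
-- A[ind-2], A[ind] are always in range here, so '.getD 0' never fires.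
def solution (A : List Int) : Int :=
  let n : Int := A.length
  if n ≤ 2 then n
  else
    let res := (PySem.List.pyRange 2 n 1).foldl
      (fun (st : Int × Int) ind =>
        let tmp :=
          if (PySem.List.pyGet? A (ind - 2)).getD 0 = (PySem.List.pyGet? A ind).getD 0
          then st.2 + 1 else 2
        (max tmp st.1, tmp)) (2, 2)
    res.1

-- ===== PORT B =====
-- groupby ported step for step: fold the matches list into run-length groups
-- (newest group kept at the head; order is irrelevant since we only take a max).
def bGroups (bs : List Bool) : List (Bool × Int) :=
  bs.foldl
    (fun gs b =>
      match gs with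
      | (k, c) :: rest => if k == b then (k, c + 1) :: rest else (b, 1) :: (k, c) :: rest
      | [] => [(b, 1)])
    []

-- max over the lengths of the True groups, default 0 (the generator max in Source B)
def bMaxRun (gs : List (Bool × Int)) : Int :=
  gs.foldl (fun m kc => if kc.1 then max m kc.2 else m) 0

def solution_alt (A : List Int) : Int :=
  let n : Int := A.length
  if n ≤ 2 then n
  else
    let ms := (PySem.List.pyRange 2 n 1).map
      (fun i => decide ((PySem.List.pyGet? A (i - 2)).getD 0 = (PySem.List.pyGet? A i).getD 0))
    2 + bMaxRun (bGroups ms)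

-- ===== PRECONDITION & SPEC =====
def Spec_solution (A : List Int) (out : Int) : Prop := out = solution_alt A
instance (A : List Int) (out : Int) : Decidable (Spec_solution A out) := by unfold Spec_solution; infer_instance

-- ===== CLAIM (what is proved, stated in full; the proofs are below) =====
def Claim_equal_solution : Prop := ∀ (A : List Int), Dom_solution A → Spec_solution A (solution A)

-- ===== LEMMAS AND PROOFS =====

-- A's loop body, abstracted over the match boolean
def fA (st : Int × Int) (b : Bool) : Int × Int :=
  let tmp := if b then st.2 + 1 else 2
  (max tmp st.1, tmp)

-- the fold step inside bGroups
def fG (gs : List (Bool × Int)) (b : Bool) : List (Bool × Int) :=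
  match gs with
  | (k, c) :: rest => if k == b then (k, c + 1) :: rest else (b, 1) :: (k, c) :: rest
  | [] => [(b, 1)]

-- length of the current (head) True run
def curRun (gs : List (Bool × Int)) : Int :=
  match gs with
  | (true, c) :: _ => c
  | _ => 0

theorem bMaxAux_max (gs : List (Bool × Int)) : ∀ (a b : Int),
    gs.foldl (fun m kc => if kc.1 then max m kc.2 else m) (max a b)
      = max a (gs.foldl (fun m kc => if kc.1 then max m kc.2 else m) b) := by
  induction gs with
  | nil => intro a b; simp
  | cons kc rest ih =>
    intro a b
    rcases kc with ⟨k, c⟩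
    cases k <;> simp [List.foldl_cons, max_assoc, ih]

theorem bMaxRun_cons (k : Bool) (c : Int) (rest : List (Bool × Int)) :
    bMaxRun ((k, c) :: rest) = if k then max c (bMaxRun rest) else bMaxRun rest := by
  cases k <;> simp [bMaxRun, List.foldl_cons]
  · rw [show max (0 : Int) c = max c 0 by omega, bMaxAux_max]

theorem bMaxRun_nonneg (gs : List (Bool × Int)) : 0 ≤ bMaxRun gs := by
  induction gs with
  | nil => simp [bMaxRun]
  | cons kc rest ih =>
    rcases kc with ⟨k, c⟩
    rw [bMaxRun_cons]
    cases k
    · simpa using ih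
    · simp only [if_true]
      exact le_trans ih (le_max_right _ _)

theorem fA_fG_step (gs : List (Bool × Int)) (b : Bool) :
    fA (2 + bMaxRun gs, 2 + curRun gs) b = (2 + bMaxRun (fG gs b), 2 + curRun (fG gs b)) := by
  have hnn := bMaxRun_nonneg gs
  cases b <;> rcases gs with _ | ⟨⟨k, c⟩, rest⟩
  · simp [fA, fG, curRun, bMaxRun]
  · have hr := bMaxRun_nonneg rest
    cases k <;> simp_all [fA, fG, curRun, bMaxRun_cons]
  · simp [fA, fG, curRun, bMaxRun]
  · have hr := bMaxRun_nonneg rest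
    cases k <;>
      simp_all [fA, fG, curRun, bMaxRun_cons] <;> omega

theorem key (bs : List Bool) : ∀ (gs : List (Bool × Int)),
    (bs.foldl fA (2 + bMaxRun gs, 2 + curRun gs)).1 = 2 + bMaxRun (bs.foldl fG gs) := by
  induction bs with
  | nil => intro gs; simp
  | cons b rest ih =>
    intro gs
    rw [List.foldl_cons, fA_fG_step, ih, List.foldl_cons]

-- ===== VERDICT (by name: the statement is the Claim_ definition above) =====
theorem solution_spec : Claim_equal_solution := by
  intro A _
  unfold Spec_solution solution solution_alt
  by_cases h : (A.length : Int) ≤ 2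
  · simp [h]
  · simp only [h, if_false]
    have hA :
        (fun (st : Int × Int) ind =>
          let tmp :=
            if (PySem.List.pyGet? A (ind - 2)).getD 0 = (PySem.List.pyGet? A ind).getD 0
            then st.2 + 1 else 2
          (max tmp st.1, tmp))
        = (fun (st : Int × Int) ind =>
            fA st (decide ((PySem.List.pyGet? A (ind - 2)).getD 0 = (PySem.List.pyGet? A ind).getD 0))) := by
      funext st ind
      by_cases hc : (PySem.List.pyGet? A (ind - 2)).getD 0 = (PySem.List.pyGet? A ind).getD 0 <;>
        simp [fA, hc]
    rw [hA]
    have hkey := key ((PySem.List.pyRange 2 (A.length : Int) 1).map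
        (fun i => decide ((PySem.List.pyGet? A (i - 2)).getD 0 = (PySem.List.pyGet? A i).getD 0))) []
    norm_num [bMaxRun, curRun] at hkey
    rw [List.foldl_map] at hkey
    have hbg : ∀ (bs : List Bool), bGroups bs = bs.foldl fG [] := fun _ => rfl
    rw [hbg]
    exact hkey
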